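-- pv_equiv track=rewrite | github.com/ShreyashPG/cloud_env_analyzer_frontend | backend/app/scanner/base.py | _parse_arm_id
-- ===== SOURCE A (Python) =====
-- def _parse_arm_id(resource_id: str) -> tuple[str, str]:
--     """
--     Parse Azure ARM resource ID into (resource_group, resource_name).
--     ARM ID format: /subscriptions/{sub}/resourceGroups/{rg}/providers/{ns}/{type}/{name}
--     """
--     parts = resource_id.split("/")
--     name = parts[-1] if parts else ""
--     rg = ""
--     for i, part in enumerate(parts):
--         if part.lower() == "resourcegroups" and i + 1 < len(parts):
--             rg = parts[i + 1]
--             break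
--     return rg, name
-- ===== SOURCE B (Python) =====
-- def _parse_arm_id(resource_id: str) -> tuple[str, str]:
--     """
--     Parse Azure ARM resource ID into (resource_group, resource_name).
--     ARM ID format: /subscriptions/{sub}/resourceGroups/{rg}/providers/{ns}/{type}/{name}
--     """
--     # Work on the raw string: the segment list is never built. Prepending "/"
--     # lets one substring search find a whole "/resourceGroups/" segment
--     # (segments contain no "/", so any match sits exactly on segment borders).
--     low = "/" + resource_id.lower()
--     p = low.find("/resourcegroups/")
--     if p == -1:
--         rg = ""
--     else:
--         rest = resource_id[p + 15:]
--         j = rest.find("/")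
--         rg = rest if j == -1 else rest[:j]
--     name = resource_id[resource_id.rfind("/") + 1:]
--     return rg, name
-- ===== Notes on version B (the rewrite author's own statement) =====
-- stated objective: alternative
-- what changed: B never builds the segment list to find the resource group: it prepends a slash to the lowercased string and does one substring search for the slash-delimited key segment (segments contain no separator, so a match sits exactly on segment borders), slicing the group name out of the original string, and takes the resource name after the last separator via rfind instead of split()[-1].
import Mathlib
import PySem

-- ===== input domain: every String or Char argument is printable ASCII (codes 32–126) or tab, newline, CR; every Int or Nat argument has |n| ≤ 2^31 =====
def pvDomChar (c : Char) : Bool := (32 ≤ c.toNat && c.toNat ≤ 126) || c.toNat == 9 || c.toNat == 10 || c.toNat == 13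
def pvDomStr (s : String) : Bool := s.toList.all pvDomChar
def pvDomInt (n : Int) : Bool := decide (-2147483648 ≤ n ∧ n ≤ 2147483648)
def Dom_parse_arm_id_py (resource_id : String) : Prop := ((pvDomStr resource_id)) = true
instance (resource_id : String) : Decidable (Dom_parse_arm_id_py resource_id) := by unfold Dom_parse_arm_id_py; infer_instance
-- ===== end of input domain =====

-- B finds the resource group by one substring search for "/resourcegroups/" on the raw
-- lowercased string (never building the segment list for it) and takes the name after the
-- last "/" via rfind; alternative algorithm, same cost.

-- ===== PORT A =====
-- the 'for i, part in enumerate(parts): if … : rg = parts[i+1]; break' loop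
def pvALoop (parts : List String) : List (Int × String) → String
  | [] => ""
  | (i, part) :: rest =>
      if PySem.Str.lower part = "resourcegroups" ∧ i + 1 < (parts.length : Int) then
        PySem.List.pyGetD parts (i + 1) ""
      else pvALoop parts rest

def parse_arm_id_py (resource_id : String) : String × String :=
  let parts := (PySem.Str.split? resource_id "/").getD []   -- sep "/" is nonempty, so split? is always some
  let name := if parts ≠ [] then PySem.List.pyGetD parts (-1) "" else ""
  let rg := pvALoop parts (PySem.List.enumerate parts 0)
  (rg, name)

-- ===== PORT B =====
def parse_arm_id_py_alt (resource_id : String) : String × String :=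
  -- low = "/" + resource_id.lower()   (string concatenation written on the char list)
  let low : List Char := '/' :: (PySem.Str.lower resource_id).toList
  -- p = low.find("/resourcegroups/")
  let p : Int := PySem.Chars.find low "/resourcegroups/".toList
  let rg : String :=
    if p = -1 then ""
    else
      -- rest = resource_id[p + 15:]
      let rest := PySem.Str.slice resource_id (some (p + 15)) none
      -- j = rest.find("/")
      let j := PySem.Str.find rest "/"
      if j = -1 then rest else PySem.Str.slice rest none (some j)
  -- name = resource_id[resource_id.rfind("/") + 1:]
  let name := PySem.Str.slice resource_id (some (PySem.Str.rfind resource_id "/" + 1)) none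
  (rg, name)

-- ===== PRECONDITION & SPEC =====
def Spec_parse_arm_id_py (resource_id : String) (out : String × String) : Prop := out = parse_arm_id_py_alt resource_id
instance (resource_id : String) (out : String × String) : Decidable (Spec_parse_arm_id_py resource_id out) := by unfold Spec_parse_arm_id_py; infer_instance

-- ===== CLAIM (what is proved, stated in full; the proofs are below) =====
def Claim_equal_parse_arm_id_py : Prop := ∀ (resource_id : String), Dom_parse_arm_id_py resource_id → Spec_parse_arm_id_py resource_id (parse_arm_id_py resource_id)

-- ===== LEMMAS AND PROOFS =====


theorem pvPyGetD_neg_one {α : Type} (xs : List α) (h : xs ≠ []) (d : α) :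
    PySem.List.pyGetD xs (-1) d = xs.getLastD d := by
  have hn : 0 < xs.length := List.length_pos_iff.mpr h
  simp only [PySem.List.pyGetD, PySem.List.pyGet?, PySem.List.pyIdx?]
  have h1 : ¬ (0:Int) ≤ -1 := by omega
  have h2 : -(xs.length:Int) ≤ -1 := by omega
  simp only [h1, if_false, h2, if_true]
  have : ((-(-1:Int)).toNat) = 1 := by decide
  rw [this, List.getLastD_eq_getLast?, List.getLast?_eq_getElem?]
  simp

theorem pvSingle_prefix_drop (c : Char) (s : List Char) (i : Nat) :
    ([c] <+: s.drop i) ↔ s[i]? = some c := by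
  have h0 : (s.drop i)[0]? = s[i]? := by rw [List.getElem?_drop]; norm_num
  rw [← h0]
  cases hd : s.drop i with
  | nil => simp
  | cons h t => simp [List.cons_prefix_cons, eq_comm]

theorem pvPrefix_getElem? {l₁ l₂ : List Char} (h : l₁ <+: l₂) (i : Nat) (hi : i < l₁.length) :
    l₂[i]? = l₁[i]? := by
  obtain ⟨t, rfl⟩ := h
  exact List.getElem?_append_left hi

theorem pvInfix_iff (sub s : List Char) : sub <:+: s ↔ ∃ m, sub <+: s.drop m := by
  constructor
  · rintro ⟨t, u, rfl⟩
    exact ⟨t.length, by simp⟩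
  · rintro ⟨m, h⟩
    exact h.isInfix.trans (List.drop_suffix m s).isInfix

theorem pvFind_first (s sub : List Char) (m : Nat) (h : sub <+: s.drop m)
    (hmin : ∀ i < m, ¬ sub <+: s.drop i) : PySem.Chars.find s sub = (m : Int) := by
  have hinf : sub <:+: s := (pvInfix_iff sub s).mpr ⟨m, h⟩
  have hnn : 0 ≤ PySem.Chars.find s sub := (PySem.Chars.find_nonneg_iff s sub).mpr hinf
  obtain ⟨hocc, hlo⟩ := PySem.Chars.find_spec hnn
  rcases lt_trichotomy (PySem.Chars.find s sub).toNat m with hlt | heq | hgt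
  · exact absurd hocc (hmin _ hlt)
  · omega
  · exact absurd h (hlo m hgt)

theorem pvFind_none (s sub : List Char) (h : ∀ m, ¬ sub <+: s.drop m) :
    PySem.Chars.find s sub = -1 := by
  rw [PySem.Chars.find_eq_neg_one_iff]
  intro hinf
  obtain ⟨m, hm⟩ := (pvInfix_iff sub s).mp hinf
  exact h m hm

theorem pvFind_slash_none (s : List Char) (h : '/' ∉ s) : PySem.Chars.find s ['/'] = -1 := by
  apply pvFind_none
  intro m hm
  rw [pvSingle_prefix_drop] at hm
  exact h (List.mem_of_getElem? hm)

theorem pvFind_slash_append (a r : List Char) (h : '/' ∉ a) :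
    PySem.Chars.find (a ++ '/' :: r) ['/'] = (a.length : Int) := by
  apply pvFind_first
  · rw [pvSingle_prefix_drop]
    rw [List.getElem?_append_right (le_refl _)]
    simp
  · intro i hi
    rw [pvSingle_prefix_drop, List.getElem?_append_left hi]
    intro hc
    exact h (List.mem_of_getElem? hc)

theorem pvDecomp (cs : List Char) (h : '/' ∈ cs) :
    ∃ a r, cs = a ++ '/' :: r ∧ '/' ∉ a := by
  refine ⟨cs.takeWhile (· ≠ '/'), (cs.dropWhile (· ≠ '/')).tail, ?_, ?_⟩
  · have hne : cs.dropWhile (· ≠ '/') ≠ [] := by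
      intro hc
      rw [List.dropWhile_eq_nil_iff] at hc
      have := hc '/' h
      simp at this
    have hhead : (cs.dropWhile (· ≠ '/')).head hne = '/' := by
      have := List.head_dropWhile_not (p := (· ≠ '/')) hne
      simpa using this
    have hdw : cs.dropWhile (· ≠ '/') = '/' :: (cs.dropWhile (· ≠ '/')).tail := by
      conv_lhs => rw [← List.cons_head_tail hne]
      rw [hhead]
    conv_lhs => rw [← List.takeWhile_append_dropWhile (p := (· ≠ '/')) (l := cs)]
    exact congrArg (List.takeWhile (fun x => decide (x ≠ '/')) cs ++ ·) hdw
  · intro hmem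
    have := List.mem_takeWhile_imp hmem
    simp at this


def pvConsHead (c : Char) : List (List Char) → List (List Char)
  | [] => [[c]]
  | x :: xs => (c :: x) :: xs

def pvSplit : List Char → List (List Char)
  | [] => [[]]
  | c :: t => if c = '/' then [] :: pvSplit t else pvConsHead c (pvSplit t)

theorem pvSplit_ne_nil (l : List Char) : pvSplit l ≠ [] := by
  induction l with
  | nil => simp [pvSplit]
  | cons c t ih =>
    by_cases h : c = '/'
    · simp [pvSplit, h]
    · cases ht : pvSplit t with
      | nil => exact absurd ht ih
      | cons x xs => simp [pvSplit, h, ht, pvConsHead]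

def pvF (cur l : List Char) : List (List Char) :=
  match pvSplit l with
  | [] => []
  | x :: xs => (cur.reverse ++ x) :: xs

theorem pvGo_eq (fuel : Nat) : ∀ (l cur : List Char) (acc : List (List Char)),
    l.length < fuel →
    PySem.Chars.splitOn.go ['/'] fuel l cur acc = acc.reverse ++ pvF cur l := by
  induction fuel with
  | zero => intro l cur acc h; omega
  | succ f ih =>
    intro l cur acc h
    cases l with
    | nil =>
      rw [PySem.Chars.splitOn.go]
      simp [pvF, pvSplit]
      omega
    | cons c rest =>
      rw [PySem.Chars.splitOn.go]
      by_cases hc : c = '/'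
      · have hp : ['/'].isPrefixOf (c :: rest) = true := by simp [List.isPrefixOf, hc]
        rw [if_pos hp]
        have hlen : rest.length < f := by simp at h; omega
        rw [show List.drop ['/'].length (c :: rest) = rest by simp]
        rw [ih rest [] (cur.reverse :: acc) hlen]
        cases hr : pvSplit rest with
        | nil => exact absurd hr (pvSplit_ne_nil rest)
        | cons x xs =>
          simp [pvF, pvSplit, hc, hr]
      · have hp : ['/'].isPrefixOf (c :: rest) = false := by simp [List.isPrefixOf]; exact fun hh => hc hh.symm
        rw [if_neg (by simp [hp])]
        have hlen : rest.length < f := by simp at h; omega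
        rw [ih rest (c :: cur) acc hlen]
        cases hr : pvSplit rest with
        | nil => exact absurd hr (pvSplit_ne_nil rest)
        | cons x xs =>
          simp [pvF, pvSplit, hc, hr, pvConsHead]

theorem pvSplitOn_eq (l : List Char) : PySem.Chars.splitOn l ['/'] = pvSplit l := by
  unfold PySem.Chars.splitOn
  rw [pvGo_eq (l.length + 1) l [] [] (by omega)]
  cases hr : pvSplit l with
  | nil => exact absurd hr (pvSplit_ne_nil l)
  | cons x xs => simp [pvF, hr]

theorem pvSplit_no_slash (a : List Char) (h : '/' ∉ a) : pvSplit a = [a] := by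
  induction a with
  | nil => rfl
  | cons c t ih =>
    have hc : c ≠ '/' := by intro hh; exact h (by simp [hh])
    have ht : '/' ∉ t := fun hm => h (by simp [hm])
    simp [pvSplit, hc, ih ht, pvConsHead]

theorem pvSplit_append (a r : List Char) (h : '/' ∉ a) :
    pvSplit (a ++ '/' :: r) = a :: pvSplit r := by
  induction a with
  | nil => simp [pvSplit]
  | cons c t ih =>
    have hc : c ≠ '/' := by intro hh; exact h (by simp [hh])
    have ht : '/' ∉ t := fun hm => h (by simp [hm])
    simp only [List.cons_append, pvSplit, if_neg hc, ih ht, pvConsHead]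

theorem pvLowerChar_slash (c : Char) (h : c ≠ '/') : PySem.Chars.lowerChar c ≠ '/' := by
  unfold PySem.Chars.lowerChar
  split
  · rename_i hu
    simp only [PySem.Chars.isupper, Bool.and_eq_true, decide_eq_true_eq] at hu
    intro hh
    obtain ⟨h1, h2⟩ := hu
    rw [Char.le_def] at h1 h2
    have h1' : 65 ≤ c.toNat := by exact_mod_cast UInt32.le_iff_toNat_le.mp h1
    have h2' : c.toNat ≤ 90 := by exact_mod_cast UInt32.le_iff_toNat_le.mp h2
    have hv : Nat.isValidChar (c.toNat + 32) := Or.inl (by omega)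
    have hn := congrArg Char.toNat hh
    rw [Char.toNat_ofNat] at hn
    simp [hv] at hn
    have h47 : ('/' : Char).toNat = 47 := by decide
    omega
  · exact h

theorem pvLower_no_slash (a : List Char) (h : '/' ∉ a) : '/' ∉ PySem.Chars.lower a := by
  unfold PySem.Chars.lower
  intro hm
  obtain ⟨c, hc, he⟩ := List.mem_map.mp hm
  exact pvLowerChar_slash c (fun hh => h (hh ▸ hc)) he

theorem pvRGo_hit (s : List Char) (j : Nat) (h : ['/'] <+: s.drop j) :
    PySem.Chars.rfind.go s ['/'] j = (j : Int) := by
  cases j with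
  | zero =>
    rw [PySem.Chars.rfind.go.eq_1]
    simp at h
    simp [List.isPrefixOf_iff_prefix, h]
  | succ m =>
    rw [PySem.Chars.rfind.go.eq_2]
    rw [if_pos (by rwa [List.isPrefixOf_iff_prefix])]

theorem pvRGo_none (s : List Char) (h : '/' ∉ s) : ∀ j, PySem.Chars.rfind.go s ['/'] j = -1 := by
  intro j
  induction j with
  | zero =>
    rw [PySem.Chars.rfind.go.eq_1]
    rw [if_neg]
    rw [List.isPrefixOf_iff_prefix]
    intro hp
    have := pvSingle_prefix_drop '/' s 0
    simp at this
    exact h (List.mem_of_getElem? (this.mp hp))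
  | succ m ih =>
    rw [PySem.Chars.rfind.go.eq_2]
    rw [if_neg, ih]
    rw [List.isPrefixOf_iff_prefix, pvSingle_prefix_drop]
    intro hp
    exact h (List.mem_of_getElem? hp)

theorem pvRGo_ge (s sub : List Char) (j : Nat) : -1 ≤ PySem.Chars.rfind.go s sub j := by
  induction j with
  | zero => rw [PySem.Chars.rfind.go.eq_1]; split <;> omega
  | succ m ih => rw [PySem.Chars.rfind.go.eq_2]; split <;> omega

theorem pvRGo_shift (a r : List Char) (j : Nat) :
    PySem.Chars.rfind.go (a ++ '/' :: r) ['/'] (a.length + 1 + j) =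
      (a.length : Int) + 1 + PySem.Chars.rfind.go r ['/'] j := by
  induction j with
  | zero =>
    rw [show a.length + 1 + 0 = Nat.succ a.length by omega]
    rw [PySem.Chars.rfind.go.eq_2]
    have hd : (a ++ '/' :: r).drop (a.length + 1) = r := by
      rw [List.drop_length_add_append (l₁ := a) (l₂ := '/' :: r) (i := 1)]
      simp
    rw [hd]
    rw [PySem.Chars.rfind.go.eq_1]
    by_cases hp : ['/'].isPrefixOf r
    · rw [if_pos hp, if_pos hp]; push_cast; omega
    · rw [if_neg hp, if_neg hp]
      have hhit : PySem.Chars.rfind.go (a ++ '/' :: r) ['/'] a.length = (a.length : Int) := by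
        apply pvRGo_hit
        have hd0 : (a ++ '/' :: r).drop a.length = '/' :: r := by
          have := List.drop_length_add_append (l₁ := a) (l₂ := '/' :: r) (i := 0)
          simpa using this
        rw [hd0]
        simp
      rw [hhit]; omega
  | succ m ih =>
    rw [show a.length + 1 + (m + 1) = Nat.succ (a.length + 1 + m) by omega]
    rw [PySem.Chars.rfind.go.eq_2]
    have hd : (a ++ '/' :: r).drop (a.length + 1 + m + 1) = r.drop (m + 1) := by
      rw [show a.length + 1 + m + 1 = a.length + (1 + (m + 1)) by omega]
      rw [List.drop_length_add_append (l₁ := a) (l₂ := '/' :: r)]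
      rw [show 1 + (m + 1) = (m + 1) + 1 by omega]
      exact List.drop_succ_cons
    rw [hd]
    conv_rhs => rw [show m + 1 = Nat.succ m from rfl, PySem.Chars.rfind.go.eq_2]
    by_cases hp : ['/'].isPrefixOf (r.drop (m + 1))
    · rw [if_pos hp, if_pos hp]; push_cast; omega
    · rw [if_neg hp, if_neg hp, ih]

theorem pvRfind_append (a r : List Char) :
    PySem.Chars.rfind (a ++ '/' :: r) ['/'] = (a.length : Int) + 1 + PySem.Chars.rfind r ['/'] := by
  unfold PySem.Chars.rfind
  rw [show (a ++ '/' :: r).length = a.length + 1 + r.length by simp; omega]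
  exact pvRGo_shift a r r.length

theorem pvRfind_no_slash (s : List Char) (h : '/' ∉ s) : PySem.Chars.rfind s ['/'] = -1 := by
  unfold PySem.Chars.rfind
  exact pvRGo_none s h s.length

theorem pvRfind_ge (s : List Char) : -1 ≤ PySem.Chars.rfind s ['/'] := pvRGo_ge s ['/'] s.length

-- misc list helpers
theorem pvGetLastD_ne {α : Type} (l : List α) (h : l ≠ []) (d1 d2 : α) :
    l.getLastD d1 = l.getLastD d2 := by
  cases l with
  | nil => exact absurd rfl h
  | cons x xs => rw [List.getLastD_cons, List.getLastD_cons]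

-- B's name slice is the last segment
theorem pvName_eq : ∀ (n : Nat) (cs : List Char), cs.length ≤ n →
    cs.drop (PySem.Chars.rfind cs ['/'] + 1).toNat = (pvSplit cs).getLastD [] := by
  intro n
  induction n with
  | zero =>
    intro cs h
    have : cs = [] := List.eq_nil_of_length_eq_zero (by omega)
    subst this
    decide
  | succ m ih =>
    intro cs hlen
    by_cases hmem : '/' ∈ cs
    · obtain ⟨a, r, rfl, ha⟩ := pvDecomp cs hmem
      rw [pvRfind_append, pvSplit_append a r ha]
      have hge := pvRfind_ge r
      have htn : ((a.length : Int) + 1 + PySem.Chars.rfind r ['/'] + 1).toNat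
          = a.length + (1 + (PySem.Chars.rfind r ['/'] + 1).toNat) := by omega
      rw [htn, List.drop_length_add_append (l₁ := a) (l₂ := '/' :: r)]
      rw [show 1 + (PySem.Chars.rfind r ['/'] + 1).toNat = (PySem.Chars.rfind r ['/'] + 1).toNat + 1 by omega]
      rw [List.drop_succ_cons]
      have hr : r.length ≤ m := by simp at hlen; omega
      rw [ih r hr]
      have hne := pvSplit_ne_nil r
      rw [List.getLastD_cons]
      exact pvGetLastD_ne _ hne _ _
    · rw [pvRfind_no_slash cs hmem, pvSplit_no_slash cs hmem]
      simp

-- A's loop computes the value after the first case-insensitive "resourcegroups" segment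
def pvFM (pairs : List (String × String)) : Option String :=
  (pairs.find? (fun p => PySem.Str.lower p.1 == "resourcegroups")).map (·.2)

theorem pvALoop_eq (parts : List String) :
    ∀ (suffix : List String) (j : Nat), parts.drop j = suffix →
      pvALoop parts (PySem.List.enumerate suffix (j : Int)) = (pvFM (suffix.zip suffix.tail)).getD "" := by
  intro suffix
  induction suffix with
  | nil => intro j _; simp [PySem.List.enumerate, pvALoop, pvFM]
  | cons p rest ihs =>
    intro j h
    have hlen : parts.length = j + 1 + rest.length := by
      have h1 : j ≤ parts.length := by
        by_contra hc
        simp [List.drop_eq_nil_of_le (le_of_not_ge hc)] at h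
      have := congrArg List.length h
      simp [List.length_drop] at this
      omega
    have hdrop1 : parts.drop (j + 1) = rest := by
      rw [← List.tail_drop, h, List.tail_cons]
    rw [PySem.List.enumerate_cons]
    by_cases hp : PySem.Str.lower p = "resourcegroups"
    · cases rest with
      | nil =>
        have : ¬ ((j : Int) + 1 < (parts.length : Int)) := by
          rw [hlen]; push_cast [List.length_nil]; omega
        simp [pvALoop, this, PySem.List.enumerate, pvFM]
      | cons q rest' =>
        have hc : (j : Int) + 1 < (parts.length : Int) := by rw [hlen]; push_cast [List.length_cons]; omega
        have hget : PySem.List.pyGetD parts ((j : Int) + 1) "" = q := by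
          rw [show ((j : Int) + 1) = ((j + 1 : Nat) : Int) by push_cast; ring,
            PySem.List.pyGetD_natCast]
          have h0 : (parts.drop (j + 1))[0]? = some q := by simp [hdrop1]
          rw [List.getElem?_drop] at h0
          have h0' : parts[j + 1]? = some q := by simpa using h0
          simp [List.getD, h0']
        simp only [pvALoop]
        rw [if_pos ⟨hp, hc⟩, hget]
        simp [pvFM, hp]
    · have hstep : pvALoop parts ((( j : Int), p) :: PySem.List.enumerate rest ((j : Int) + 1)) =
          pvALoop parts (PySem.List.enumerate rest ((j : Int) + 1)) := by
        simp [pvALoop, hp]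
      rw [hstep, show ((j : Int) + 1) = ((j + 1 : Nat) : Int) by push_cast; ring,
        ihs (j + 1) hdrop1]
      cases rest with
      | nil => rfl
      | cons q rest' =>
        have hb : (PySem.Str.lower p == "resourcegroups") = false := by simp [hp]
        simp only [List.tail_cons, pvFM, List.zip_cons_cons, List.find?, hb]

def pvRG : List (List Char) → Option (List Char)
  | a :: b :: t =>
      if PySem.Chars.lower a = "resourcegroups".toList then some b else pvRG (b :: t)
  | _ => none

theorem pvOfList_lower_true (a : List Char) (h : PySem.Chars.lower a = "resourcegroups".toList) :
    (PySem.Str.lower (String.ofList a) == "resourcegroups") = true := by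
  have h1 : PySem.Str.lower (String.ofList a) = String.ofList (PySem.Chars.lower a) := by
    unfold PySem.Str.lower
    rw [String.toList_ofList]
  rw [h1, h]
  simp

theorem pvOfList_lower_false (a : List Char) (h : PySem.Chars.lower a ≠ "resourcegroups".toList) :
    (PySem.Str.lower (String.ofList a) == "resourcegroups") = false := by
  have h1 : PySem.Str.lower (String.ofList a) = String.ofList (PySem.Chars.lower a) := by
    unfold PySem.Str.lower
    rw [String.toList_ofList]
  rw [h1, beq_eq_false_iff_ne]
  intro hc
  have := congrArg String.toList hc
  rw [String.toList_ofList] at this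
  exact h this

theorem pvFM_eq_pvRG (ps : List (List Char)) :
    pvFM ((ps.map String.ofList).zip (ps.map String.ofList).tail) = (pvRG ps).map String.ofList := by
  induction ps with
  | nil => simp [pvFM, pvRG]
  | cons a tl ih =>
    cases tl with
    | nil => simp [pvFM, pvRG]
    | cons b t =>
      simp only [List.map_cons, List.tail_cons, List.zip_cons_cons, pvFM]
      rw [List.find?_cons]
      by_cases hw : PySem.Chars.lower a = "resourcegroups".toList
      · rw [show (PySem.Str.lower (String.ofList a, String.ofList b).1 == "resourcegroups") = true from pvOfList_lower_true a hw]
        simp [pvRG, hw]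
      · rw [show (PySem.Str.lower (String.ofList a, String.ofList b).1 == "resourcegroups") = false from pvOfList_lower_false a hw]
        have hr : pvRG (a :: b :: t) = pvRG (b :: t) := by
          show (if PySem.Chars.lower a = "resourcegroups".toList then some b else pvRG (b :: t)) = pvRG (b :: t)
          rw [if_neg hw]
        rw [hr, ← ih]
        simp [pvFM]

-- no occurrence of the pattern before the second slash unless the first segment matches
theorem pvNoEarly (la z : List Char) (h : '/' ∉ la) (hw : la ≠ "resourcegroups".toList) :
    ¬ ("/resourcegroups/".toList <+: '/' :: la ++ '/' :: z) := by
  intro hp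
  have hpat : "/resourcegroups/".toList = '/' :: ("resourcegroups".toList ++ ['/']) := by decide
  rw [hpat, List.cons_append, List.cons_prefix_cons] at hp
  have hp' : "resourcegroups".toList ++ ['/'] <+: la ++ '/' :: z := hp.2
  have hwlen : ("resourcegroups".toList).length = 14 := by decide
  have hwmem : '/' ∉ "resourcegroups".toList := by decide
  rcases lt_trichotomy la.length 14 with hlt | heq | hgt
  · have hi := pvPrefix_getElem? hp' la.length (by simp [hwlen]; omega)
    rw [List.getElem?_append_right (le_refl la.length)] at hi
    rw [Nat.sub_self] at hi
    rw [List.getElem?_append_left (by omega : la.length < ("resourcegroups".toList).length)] at hi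
    have hm : ('/':Char) ∈ "resourcegroups".toList := by
      apply List.mem_of_getElem?
      rw [← hi]
      simp
    exact hwmem hm
  · obtain ⟨t, ht⟩ := hp'
    apply hw
    have h1 := congrArg (List.take 14) ht
    rw [List.append_assoc] at h1
    conv_lhs at h1 => rw [show (14:Nat) = ("resourcegroups".toList).length from hwlen.symm]
    rw [List.take_left] at h1
    conv_rhs at h1 => rw [show (14:Nat) = la.length by omega]
    rw [List.take_left] at h1
    exact h1.symm
  · have hi := pvPrefix_getElem? hp' 14 (by simp [hwlen])
    rw [List.getElem?_append_left (by omega : 14 < la.length)] at hi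
    rw [List.getElem?_append_right (by omega : ("resourcegroups".toList).length ≤ 14)] at hi
    rw [hwlen, Nat.sub_self] at hi
    have hm : ('/':Char) ∈ la := by
      apply List.mem_of_getElem?
      rw [hi]
      decide
    exact h hm

-- the pattern search skips a non-matching first segment
theorem pvFind_shift (a r : List Char) (ha : '/' ∉ PySem.Chars.lower a)
    (hw : PySem.Chars.lower a ≠ "resourcegroups".toList) :
    PySem.Chars.find ('/' :: PySem.Chars.lower a ++ '/' :: PySem.Chars.lower r) "/resourcegroups/".toList =
      (if PySem.Chars.find ('/' :: PySem.Chars.lower r) "/resourcegroups/".toList = -1 then -1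
       else (a.length : Int) + 1 + PySem.Chars.find ('/' :: PySem.Chars.lower r) "/resourcegroups/".toList) := by
  set la := PySem.Chars.lower a with hla
  set lr := PySem.Chars.lower r with hlr
  set low : List Char := '/' :: la ++ '/' :: lr with hlow
  set low' : List Char := '/' :: lr with hlow'
  set pat : List Char := "/resourcegroups/".toList with hpat
  have hlen : a.length = la.length := by rw [hla]; unfold PySem.Chars.lower; simp
  -- no occurrence starts at or before the first segment
  have hF1 : ∀ i ≤ la.length, ¬ pat <+: low.drop i := by
    intro i hi hp
    cases Nat.eq_zero_or_pos i with
    | inl h0 =>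
      subst h0
      rw [List.drop_zero] at hp
      exact pvNoEarly la lr ha hw hp
    | inr hpos =>
      have hsl : ['/'] <+: low.drop i := by
        refine List.IsPrefix.trans ?_ hp
        rw [hpat]; decide
      rw [pvSingle_prefix_drop] at hsl
      have hget : low[i]? = la[i-1]? := by
        rw [hlow]
        rw [show ('/' :: la ++ '/' :: lr) = ('/' :: la) ++ '/' :: lr by simp]
        rw [List.getElem?_append_left (by simp; omega)]
        cases i with
        | zero => omega
        | succ k => simp
      rw [hget] at hsl
      exact ha (List.mem_of_getElem? hsl)
  -- occurrences beyond the first segment are occurrences in low'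
  have hF2 : ∀ k, low.drop (la.length + 1 + k) = low'.drop k := by
    intro k
    rw [hlow, hlow']
    rw [show ('/' :: la ++ '/' :: lr) = ('/' :: la) ++ '/' :: lr by simp]
    rw [show la.length + 1 + k = ('/' :: la).length + k by simp]
    rw [List.drop_length_add_append]
  by_cases hfind : PySem.Chars.find low' pat = -1
  · rw [if_pos hfind]
    apply pvFind_none
    intro m hp
    rcases le_or_gt m la.length with hle | hgt
    · exact hF1 m hle hp
    · have hk : m = la.length + 1 + (m - la.length - 1) := by omega
      rw [hk, hF2] at hp
      rw [PySem.Chars.find_eq_neg_one_iff] at hfind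
      exact hfind ((pvInfix_iff pat low').mpr ⟨_, hp⟩)
  · rw [if_neg hfind]
    have hnn : 0 ≤ PySem.Chars.find low' pat := by
      rw [PySem.Chars.find_nonneg_iff]
      by_contra hc
      exact hfind ((PySem.Chars.find_eq_neg_one_iff low' pat).mpr hc)
    obtain ⟨hocc, hmin⟩ := PySem.Chars.find_spec hnn
    set m' := (PySem.Chars.find low' pat).toNat with hm'
    have hres : PySem.Chars.find low pat = ((la.length + 1 + m' : Nat) : Int) := by
      apply pvFind_first
      · rw [hF2]; exact hocc
      · intro i hilt
        rcases le_or_gt i la.length with hle | hgt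
        · exact hF1 i hle
        · have hk : i = la.length + 1 + (i - la.length - 1) := by omega
          rw [hk, hF2]
          exact hmin _ (by omega)
    rw [hres]
    push_cast
    omega

-- B's char-level rg value
def pvBrg (cs : List Char) : List Char :=
  let low := '/' :: PySem.Chars.lower cs
  let p := PySem.Chars.find low "/resourcegroups/".toList
  if p = -1 then []
  else
    let rest := cs.drop (p + 15).toNat
    let j := PySem.Chars.find rest ['/']
    if j = -1 then rest else rest.take j.toNat

theorem pvRg_eq : ∀ (n : Nat) (cs : List Char), cs.length ≤ n →
    pvBrg cs = (pvRG (pvSplit cs)).getD [] := by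
  intro n
  induction n with
  | zero =>
    intro cs h
    have : cs = [] := List.eq_nil_of_length_eq_zero (by omega)
    subst this
    decide
  | succ m ih =>
    intro cs hlen
    by_cases hmem : '/' ∈ cs
    · obtain ⟨a, r, rfl, ha⟩ := pvDecomp cs hmem
      have hrlen : r.length ≤ m := by simp at hlen; omega
      have hsplit : pvSplit (a ++ '/' :: r) = a :: pvSplit r := pvSplit_append a r ha
      have hlow : PySem.Chars.lower (a ++ '/' :: r)
          = PySem.Chars.lower a ++ '/' :: PySem.Chars.lower r := by
        unfold PySem.Chars.lower
        rw [List.map_append, List.map_cons]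
        rw [show PySem.Chars.lowerChar '/' = '/' by decide]
      by_cases hw : PySem.Chars.lower a = "resourcegroups".toList
      · -- the first segment is the key: the pattern is found at position 0
        have halen : a.length = 14 := by
          have h1 : (PySem.Chars.lower a).length = a.length := by
            unfold PySem.Chars.lower; simp
          rw [hw] at h1
          have : ("resourcegroups".toList).length = 14 := by decide
          omega
        have hfind : PySem.Chars.find ('/' :: PySem.Chars.lower (a ++ '/' :: r))
            "/resourcegroups/".toList = 0 := by
          apply pvFind_first _ _ 0
          · rw [List.drop_zero, hlow, hw]
            rw [show "/resourcegroups/".toList = '/' :: ("resourcegroups".toList ++ ['/']) by decide]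
            rw [List.cons_prefix_cons]
            refine ⟨rfl, ?_⟩
            rw [show "resourcegroups".toList ++ '/' :: PySem.Chars.lower r
                = ("resourcegroups".toList ++ ['/']) ++ PySem.Chars.lower r by simp]
            exact List.prefix_append _ _
          · intro i hi; omega
        have hdrop : (a ++ '/' :: r).drop 15 = r := by
          rw [show 15 = a.length + 1 by omega]
          rw [List.drop_length_add_append (l₁ := a) (l₂ := '/' :: r) (i := 1)]
          simp
        simp only [pvBrg]
        rw [hfind]
        rw [if_neg (by omega : ¬ ((0:Int) = -1))]
        rw [show ((0:Int) + 15).toNat = 15 by decide]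
        rw [hdrop, hsplit]
        by_cases hr : '/' ∈ r
        · obtain ⟨b, r2, rfl, hb⟩ := pvDecomp r hr
          rw [pvFind_slash_append b r2 hb]
          rw [if_neg (by omega : ¬ ((b.length : Int) = -1))]
          rw [Int.toNat_natCast, List.take_left]
          rw [pvSplit_append b r2 hb]
          have hRG : pvRG (a :: b :: pvSplit r2) = some b := by
            show (if PySem.Chars.lower a = "resourcegroups".toList then some b
                  else pvRG (b :: pvSplit r2)) = some b
            rw [if_pos hw]
          rw [hRG]
          rfl
        · rw [pvFind_slash_none r hr, if_pos rfl]
          rw [pvSplit_no_slash r hr]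
          have hRG : pvRG (a :: [r]) = some r := by
            show (if PySem.Chars.lower a = "resourcegroups".toList then some r
                  else pvRG [r]) = some r
            rw [if_pos hw]
          rw [hRG]
          rfl
      · -- the first segment does not match: the search continues in the rest
        have hshift := pvFind_shift a r (pvLower_no_slash a ha) hw
        rw [List.cons_append] at hshift
        have hRGskip : pvRG (pvSplit (a ++ '/' :: r)) = pvRG (pvSplit r) := by
          rw [hsplit]
          cases hps : pvSplit r with
          | nil => exact absurd hps (pvSplit_ne_nil r)
          | cons x xs =>
            show (if PySem.Chars.lower a = "resourcegroups".toList then some x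
                  else pvRG (x :: xs)) = pvRG (x :: xs)
            rw [if_neg hw]
        simp only [pvBrg]
        rw [hlow, hshift, hRGskip, ← ih r hrlen]
        by_cases hq : PySem.Chars.find ('/' :: PySem.Chars.lower r) "/resourcegroups/".toList = -1
        · rw [if_pos hq]
          simp only [pvBrg]
          rw [hq]
          simp
        · rw [if_neg hq]
          have hq0 : 0 ≤ PySem.Chars.find ('/' :: PySem.Chars.lower r) "/resourcegroups/".toList := by
            rw [PySem.Chars.find_nonneg_iff]
            by_contra hc
            exact hq ((PySem.Chars.find_eq_neg_one_iff _ _).mpr hc)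
          set q := PySem.Chars.find ('/' :: PySem.Chars.lower r) "/resourcegroups/".toList with hqdef
          rw [if_neg (by omega : ¬ ((a.length : Int) + 1 + q = -1))]
          have htn : ((a.length : Int) + 1 + q + 15).toNat = a.length + (1 + (q + 15).toNat) := by
            omega
          rw [htn, List.drop_length_add_append (l₁ := a) (l₂ := '/' :: r)]
          rw [show 1 + (q + 15).toNat = (q + 15).toNat + 1 by omega, List.drop_succ_cons]
          simp only [pvBrg]
          rw [← hqdef, if_neg hq]
    · -- no slash at all: the pattern cannot occur and there is a single segment
      have hfind : PySem.Chars.find ('/' :: PySem.Chars.lower cs) "/resourcegroups/".toList = -1 := by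
        apply pvFind_none
        intro i hp
        have hinf : "/resourcegroups/".toList <:+: '/' :: PySem.Chars.lower cs :=
          (pvInfix_iff _ _).mpr ⟨i, hp⟩
        have hcount := hinf.count_le '/'
        have h2 : ("/resourcegroups/".toList).count '/' = 2 := by decide
        have h1 : ('/' :: PySem.Chars.lower cs).count '/' = 1 := by
          rw [List.count_cons_self]
          rw [List.count_eq_zero_of_not_mem (pvLower_no_slash cs hmem)]
        omega
      simp only [pvBrg]
      rw [hfind, if_pos rfl, pvSplit_no_slash cs hmem]
      rfl

-- ===== VERDICT (by name: the statement is the Claim_ definition above) =====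
theorem parse_arm_id_py_spec : Claim_equal_parse_arm_id_py := by
  intro s _
  unfold Spec_parse_arm_id_py parse_arm_id_py parse_arm_id_py_alt
  have hsep : ("/" : String).toList = ['/'] := by decide
  have hparts : (PySem.Str.split? s "/").getD [] = (pvSplit s.toList).map String.ofList := by
    unfold PySem.Str.split? PySem.Chars.split?
    rw [hsep]
    simp [pvSplitOn_eq]
  have hne : (pvSplit s.toList).map String.ofList ≠ [] := by
    simp [pvSplit_ne_nil]
  -- names agree
  have hnameA : (if (PySem.Str.split? s "/").getD [] ≠ [] then
        PySem.List.pyGetD ((PySem.Str.split? s "/").getD []) (-1) "" else "")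
      = String.ofList ((pvSplit s.toList).getLastD []) := by
    rw [hparts, if_pos hne, pvPyGetD_neg_one _ hne]
    rw [show ("" : String) = String.ofList [] from rfl, List.getLastD_map]
  have hrfind : PySem.Str.rfind s "/" = PySem.Chars.rfind s.toList ['/'] := by
    unfold PySem.Str.rfind
    rw [hsep]
  have hnameB : PySem.Str.slice s (some (PySem.Str.rfind s "/" + 1)) none
      = String.ofList ((pvSplit s.toList).getLastD []) := by
    have ht : (PySem.Str.slice s (some (PySem.Str.rfind s "/" + 1)) none).toList
        = (pvSplit s.toList).getLastD [] := by
      rw [PySem.Str.toList_slice]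
      unfold PySem.Chars.slice
      rw [hrfind, PySem.List.slice_from _ (by have := pvRfind_ge s.toList; omega)]
      exact pvName_eq s.toList.length s.toList le_rfl
    have := congrArg String.ofList ht
    rwa [String.ofList_toList] at this
  -- resource groups agree
  have hrgA : pvALoop ((PySem.Str.split? s "/").getD [])
        (PySem.List.enumerate ((PySem.Str.split? s "/").getD []) 0)
      = ((pvRG (pvSplit s.toList)).map String.ofList).getD "" := by
    have h0 := pvALoop_eq ((PySem.Str.split? s "/").getD []) ((PySem.Str.split? s "/").getD []) 0 (by simp)
    rw [show ((0 : Nat) : Int) = (0 : Int) by norm_num] at h0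
    rw [h0, hparts, pvFM_eq_pvRG]
  have hlow : (PySem.Str.lower s).toList = PySem.Chars.lower s.toList := PySem.Str.toList_lower s
  have hrgB : (if PySem.Chars.find ('/' :: (PySem.Str.lower s).toList) "/resourcegroups/".toList = -1 then ""
      else
        (if PySem.Str.find (PySem.Str.slice s (some (PySem.Chars.find ('/' :: (PySem.Str.lower s).toList) "/resourcegroups/".toList + 15)) none) "/" = -1 then
          PySem.Str.slice s (some (PySem.Chars.find ('/' :: (PySem.Str.lower s).toList) "/resourcegroups/".toList + 15)) none
        else
          PySem.Str.slice (PySem.Str.slice s (some (PySem.Chars.find ('/' :: (PySem.Str.lower s).toList) "/resourcegroups/".toList + 15)) none) none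
            (some (PySem.Str.find (PySem.Str.slice s (some (PySem.Chars.find ('/' :: (PySem.Str.lower s).toList) "/resourcegroups/".toList + 15)) none) "/"))))
      = String.ofList (pvBrg s.toList) := by
    rw [hlow]
    simp only [pvBrg]
    by_cases hp : PySem.Chars.find ('/' :: PySem.Chars.lower s.toList) "/resourcegroups/".toList = -1
    · rw [if_pos hp, if_pos hp]
    · rw [if_neg hp, if_neg hp]
      have hp0 : 0 ≤ PySem.Chars.find ('/' :: PySem.Chars.lower s.toList) "/resourcegroups/".toList := by
        rw [PySem.Chars.find_nonneg_iff]
        by_contra hc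
        exact hp ((PySem.Chars.find_eq_neg_one_iff _ _).mpr hc)
      set p := PySem.Chars.find ('/' :: PySem.Chars.lower s.toList) "/resourcegroups/".toList with hpdef
      have hrest : (PySem.Str.slice s (some (p + 15)) none).toList
          = s.toList.drop (p + 15).toNat := by
        rw [PySem.Str.toList_slice]
        unfold PySem.Chars.slice
        rw [PySem.List.slice_from _ (by omega)]
      have hj : PySem.Str.find (PySem.Str.slice s (some (p + 15)) none) "/"
          = PySem.Chars.find (s.toList.drop (p + 15).toNat) ['/'] := by
        unfold PySem.Str.find
        rw [hsep, hrest]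
      rw [hj]
      by_cases hjj : PySem.Chars.find (s.toList.drop (p + 15).toNat) ['/'] = -1
      · rw [if_pos hjj, if_pos hjj]
        have := congrArg String.ofList hrest
        rwa [String.ofList_toList] at this
      · rw [if_neg hjj, if_neg hjj]
        have hj0 : 0 ≤ PySem.Chars.find (s.toList.drop (p + 15).toNat) ['/'] := by
          rw [PySem.Chars.find_nonneg_iff]
          by_contra hc
          exact hjj ((PySem.Chars.find_eq_neg_one_iff _ _).mpr hc)
        have hts : (PySem.Str.slice (PySem.Str.slice s (some (p + 15)) none) none
              (some (PySem.Chars.find (s.toList.drop (p + 15).toNat) ['/']))).toList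
            = (s.toList.drop (p + 15).toNat).take (PySem.Chars.find (s.toList.drop (p + 15).toNat) ['/']).toNat := by
          rw [PySem.Str.toList_slice]
          unfold PySem.Chars.slice
          rw [hrest, PySem.List.slice_to _ hj0]
        have := congrArg String.ofList hts
        rwa [String.ofList_toList] at this
  have hBrg : String.ofList (pvBrg s.toList) = ((pvRG (pvSplit s.toList)).map String.ofList).getD "" := by
    rw [pvRg_eq s.toList.length s.toList le_rfl]
    cases pvRG (pvSplit s.toList) with
    | none => rfl
    | some x => rfl
  simp only [hnameA, hnameB, hrgA, hrgB, hBrg]
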